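-- pv_equiv track=rewrite | github.com/NoyeArk/graduation_design | GCNdata.py | get_latest_interaction
-- ===== SOURCE A (Python) =====
-- import copy
--
-- last = 10  # 5 for BMS; 10 for SNR
--
-- def get_latest_interaction(user_item_pairs, keep=last):
--     """
--     获取每个用户最近的交互记录
--
--     Args:
--         user_item_pairs (`list`): 用户-物品对
--         keep (`int`): 保留的交互次数
--
--     Returns:
--         dict: { (user, item): [最近的交互记录] }
--     """
--     result = dict()
--     init = [-1 for i in range(keep)]
--     latest = copy.deepcopy(init)
--
--     # 遍历用户-物品对
--     for i, (user, item) in enumerate(user_item_pairs):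
--         result[(user, item)] = copy.deepcopy(list(latest[-keep:]))
--         if i < len(user_item_pairs) - 1:
--             if user_item_pairs[i + 1][0] != user:
--                 latest = copy.deepcopy(init)
--             else:
--                 latest.append(item)
--     return result
-- ===== SOURCE B (Python) =====
-- def get_latest_interaction(user_item_pairs, keep=10):
--     """Group the pairs into maximal consecutive same-user runs, then scan each run."""
--     result = {}
--     rest = user_item_pairs
--     while rest:
--         user = rest[0][0]
--         run = []
--         while rest and rest[0][0] == user:
--             run.append(rest[0])
--             rest = rest[1:]
--         latest = [-1] * keep
--         for _, item in run:
--             result[(user, item)] = list(latest[-keep:])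
--             latest.append(item)
--     return result
-- ===== Notes on version B (the rewrite author's own statement) =====
-- stated objective: alternative
-- what changed: A does one flat pass over the pairs, peeking at the next pair's user to decide whether to reset the history; B instead partitions the sequence into maximal consecutive same-user runs and rebuilds each run's history in a nested scan starting from a fresh [-1]*keep buffer.
import Mathlib
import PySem

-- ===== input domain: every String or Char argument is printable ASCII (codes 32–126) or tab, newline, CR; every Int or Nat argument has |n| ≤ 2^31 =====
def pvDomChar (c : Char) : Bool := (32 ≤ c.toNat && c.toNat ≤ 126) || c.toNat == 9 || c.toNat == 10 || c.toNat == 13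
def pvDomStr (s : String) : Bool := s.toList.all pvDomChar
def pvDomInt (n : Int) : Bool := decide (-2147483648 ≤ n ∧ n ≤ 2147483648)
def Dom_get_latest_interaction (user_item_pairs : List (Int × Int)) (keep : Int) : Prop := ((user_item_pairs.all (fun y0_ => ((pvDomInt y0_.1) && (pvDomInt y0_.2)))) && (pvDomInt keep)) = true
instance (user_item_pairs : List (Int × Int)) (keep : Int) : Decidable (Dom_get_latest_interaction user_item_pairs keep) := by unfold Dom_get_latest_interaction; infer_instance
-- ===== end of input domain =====

-- B replaces A's single pass with next-pair lookahead by an explicit partition into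
-- maximal consecutive same-user runs followed by a nested scan of each run (objective: alternative).

-- ===== PORT A =====
-- the loop body of A's single 'for i, (user, item) in enumerate(user_item_pairs)' pass
def pvStepA (pairs : List (Int × Int)) (keep : Int) (init : List Int)
    (st : PySem.Dict (Int × Int) (List Int) × List Int) (ip : Int × Int × Int) :
    PySem.Dict (Int × Int) (List Int) × List Int :=
  let i := ip.1
  let user := ip.2.1
  let item := ip.2.2
  -- result[(user, item)] = copy.deepcopy(list(latest[-keep:]))  (deepcopy of ints = identity)
  let result := st.1.insert (user, item) (PySem.List.slice st.2 (some (-keep)) none)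
  let latest :=
    if i < (pairs.length : Int) - 1 then
      if ((PySem.List.pyGet? pairs (i + 1)).getD (0, 0)).1 ≠ user then init  -- guard ensures the index is in range; getD default unreachable
      else st.2 ++ [item]
    else st.2
  (result, latest)

def get_latest_interaction (user_item_pairs : List (Int × Int)) (keep : Int) : List (Int × Int × List Int) :=
  let init : List Int := (PySem.List.pyRange 0 keep 1).map (fun _ => (-1 : Int))  -- [ -1 for i in range(keep) ]
  let st := (PySem.List.enumerate user_item_pairs 0).foldl
      (pvStepA user_item_pairs keep init) (PySem.Dict.empty, init)
  st.1.items.map (fun p => (p.1.1, p.1.2, p.2))  -- dict {(u,i): v} as List (Int × Int × List Int)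

-- ===== PORT B =====
-- 'while rest and rest[0][0] == user: run.append(rest[0]); rest = rest[1:]' → (run, rest-after-run)
def pvCollectRun (u : Int) : List (Int × Int) → List (Int × Int) × List (Int × Int)
  | [] => ([], [])
  | p :: rest =>
    if p.1 = u then
      let r := pvCollectRun u rest
      (p :: r.1, r.2)
    else ([], p :: rest)

-- termination helper for pvBGo (cited in decreasing_by)
theorem pvCollectRun_len (u : Int) (l : List (Int × Int)) :
    (pvCollectRun u l).2.length ≤ l.length := by
  induction l with
  | nil => simp [pvCollectRun]
  | cons p rest ih =>
    by_cases h : p.1 = u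
    · simp only [pvCollectRun, if_pos h, List.length_cons]; omega
    · simp [pvCollectRun, h]

-- 'for _, item in run: result[(user,item)] = list(latest[-keep:]); latest.append(item)'
def pvRunFold (keep : Int) : List (Int × Int) → List Int → PySem.Dict (Int × Int) (List Int) →
    PySem.Dict (Int × Int) (List Int)
  | [], _, d => d
  | (u, item) :: rest, latest, d =>
    pvRunFold keep rest (latest ++ [item])
      (d.insert (u, item) (PySem.List.slice latest (some (-keep)) none))

-- the outer 'while rest:' loop; the first inner-while iteration always takes the head (p.1 == p.1)
def pvBGo (keep : Int) (init : List Int) :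
    List (Int × Int) → PySem.Dict (Int × Int) (List Int) → PySem.Dict (Int × Int) (List Int)
  | [], d => d
  | p :: rest, d =>
    let r := pvCollectRun p.1 rest
    pvBGo keep init r.2 (pvRunFold keep (p :: r.1) init d)
termination_by l => l.length
decreasing_by
  simp only [List.length_cons]
  have := pvCollectRun_len p.1 rest
  omega

def get_latest_interaction_alt (user_item_pairs : List (Int × Int)) (keep : Int) : List (Int × Int × List Int) :=
  let init : List Int := List.replicate keep.toNat (-1)  -- [-1] * keep
  (pvBGo keep init user_item_pairs PySem.Dict.empty).items.map (fun p => (p.1.1, p.1.2, p.2))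

-- ===== PRECONDITION & SPEC =====
def Spec_get_latest_interaction (user_item_pairs : List (Int × Int)) (keep : Int) (out : List (Int × Int × List Int)) : Prop := out = get_latest_interaction_alt user_item_pairs keep
instance (user_item_pairs : List (Int × Int)) (keep : Int) (out : List (Int × Int × List Int)) : Decidable (Spec_get_latest_interaction user_item_pairs keep out) := by unfold Spec_get_latest_interaction; infer_instance

-- ===== CLAIM (what is proved, stated in full; the proofs are below) =====
def Claim_equal_get_latest_interaction : Prop := ∀ (user_item_pairs : List (Int × Int)) (keep : Int), Dom_get_latest_interaction user_item_pairs keep → Spec_get_latest_interaction user_item_pairs keep (get_latest_interaction user_item_pairs keep)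

-- ===== LEMMAS AND PROOFS =====

-- proof-only recursive reformulation of A's fold (lookahead made structural)
def pvAGo (keep : Int) (init : List Int) :
    List (Int × Int) → List Int → PySem.Dict (Int × Int) (List Int) → PySem.Dict (Int × Int) (List Int)
  | [], _, d => d
  | (u, item) :: rest, latest, d =>
    let d' := d.insert (u, item) (PySem.List.slice latest (some (-keep)) none)
    match rest with
    | [] => d'
    | (u', _) :: _ => pvAGo keep init rest (if u' ≠ u then init else latest ++ [item]) d'

theorem pvAGo_single (keep : Int) (init : List Int) (u item : Int) (latest : List Int)
    (d : PySem.Dict (Int × Int) (List Int)) :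
    pvAGo keep init [(u, item)] latest d
      = d.insert (u, item) (PySem.List.slice latest (some (-keep)) none) := rfl

theorem pvAGo_cons_cons (keep : Int) (init : List Int) (u item u' item' : Int)
    (rest : List (Int × Int)) (latest : List Int) (d : PySem.Dict (Int × Int) (List Int)) :
    pvAGo keep init ((u, item) :: (u', item') :: rest) latest d
      = pvAGo keep init ((u', item') :: rest) (if u' ≠ u then init else latest ++ [item])
          (d.insert (u, item) (PySem.List.slice latest (some (-keep)) none)) := rfl

-- A's init equals B's init
theorem pv_init_eq (keep : Int) :
    (PySem.List.pyRange 0 keep 1).map (fun _ => (-1 : Int)) = List.replicate keep.toNat (-1) := by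
  rw [List.map_const']
  simp [PySem.List.length_pyRange_one]

-- A's enumerate-fold over a suffix equals pvAGo on that suffix
theorem pv_foldA_eq_aGo (keep : Int) (init : List Int) (pairs : List (Int × Int)) :
    ∀ (rest front : List (Int × Int)) (latest : List Int) (d : PySem.Dict (Int × Int) (List Int)),
      pairs = front ++ rest →
      ((PySem.List.enumerate rest (front.length : Int)).foldl (pvStepA pairs keep init) (d, latest)).1
        = pvAGo keep init rest latest d := by
  intro rest
  induction rest with
  | nil => intro front latest d _; simp [PySem.List.enumerate_nil, pvAGo]
  | cons p rest2 ih =>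
    intro front latest d hp
    obtain ⟨u, item⟩ := p
    have hlen : (pairs.length : Int) = (front.length : Int) + 1 + rest2.length := by
      subst hp; simp [List.length_append]; omega
    rw [PySem.List.enumerate_cons, List.foldl_cons]
    cases rest2 with
    | nil =>
      have hcond : ¬ ((front.length : Int) < (pairs.length : Int) - 1) := by
        rw [hlen]; simp
      rw [pvAGo_single]
      simp only [pvStepA, if_neg hcond, PySem.List.enumerate_nil, List.foldl_nil]
    | cons q rest3 =>
      obtain ⟨u', item'⟩ := q
      have hcond : (front.length : Int) < (pairs.length : Int) - 1 := by
        rw [hlen]; simp only [List.length_cons]; push_cast; omega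
      have hget : PySem.List.pyGet? pairs ((front.length : Int) + 1) = some (u', item') := by
        have h1 : ((front.length : Int) + 1) = ((front.length + 1 : Nat) : Int) := by push_cast; ring
        rw [h1, PySem.List.pyGet?_natCast, hp]
        rw [List.getElem?_append_right (by omega)]
        simp
      have harg : ((front.length : Int) + 1) = (((front ++ [(u, item)]).length : Nat) : Int) := by
        simp
      rw [pvAGo_cons_cons]
      have hrec := ih (front ++ [(u, item)])
        (if u' ≠ u then init else latest ++ [item])
        (PySem.Dict.insert d (u, item) (PySem.List.slice latest (some (-keep)) none))
        (by simpa using hp)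
      rw [← harg] at hrec
      by_cases hne : u' = u
      · simp only [pvStepA, if_pos hcond, hget, Option.getD_some, hne, ne_eq, not_true_eq_false,
          ite_false] at hrec ⊢
        exact hrec
      · simp only [pvStepA, if_pos hcond, hget, Option.getD_some, ne_eq, hne, not_false_eq_true,
          ite_true] at hrec ⊢
        exact hrec

-- one run: pvAGo on a same-user head equals run-fold then pvAGo on the remainder with a fresh latest
theorem pv_aGo_run (keep : Int) (init : List Int) (u : Int) :
    ∀ (l : List (Int × Int)) (item : Int) (latest : List Int) (d : PySem.Dict (Int × Int) (List Int)),
      pvAGo keep init ((u, item) :: l) latest d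
        = pvAGo keep init (pvCollectRun u l).2 init
            (pvRunFold keep ((u, item) :: (pvCollectRun u l).1) latest d) := by
  intro l
  induction l with
  | nil => intro item latest d; simp [pvAGo, pvCollectRun, pvRunFold]
  | cons q l2 ih =>
    intro item latest d
    obtain ⟨u', item'⟩ := q
    by_cases h : u' = u
    · subst h
      rw [pvAGo_cons_cons, if_neg (by simp : ¬ (u' ≠ u'))]
      rw [ih item' (latest ++ [item])
        (PySem.Dict.insert d (u', item) (PySem.List.slice latest (some (-keep)) none))]
      simp [pvCollectRun, pvRunFold]
    · rw [pvAGo_cons_cons, if_pos (by simpa using h)]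
      simp [pvCollectRun, h, pvRunFold]

-- whole list: pvAGo with a fresh latest equals B's run loop (induction on a length bound)
theorem pv_aGo_eq_bGo (keep : Int) (init : List Int) :
    ∀ (n : Nat) (l : List (Int × Int)) (d : PySem.Dict (Int × Int) (List Int)),
      l.length ≤ n → pvAGo keep init l init d = pvBGo keep init l d := by
  intro n
  induction n with
  | zero =>
    intro l d h
    have hnil : l = [] := List.eq_nil_of_length_eq_zero (by omega)
    subst hnil; simp [pvAGo, pvBGo]
  | succ n ih =>
    intro l d h
    cases l with
    | nil => simp [pvAGo, pvBGo]
    | cons p rest =>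
      obtain ⟨u, item⟩ := p
      rw [pv_aGo_run, pvBGo]
      exact ih _ _ (by have := pvCollectRun_len u rest; simp at h; omega)

-- ===== VERDICT (by name: the statement is the Claim_ definition above) =====
theorem get_latest_interaction_spec : Claim_equal_get_latest_interaction := by
  intro pairs keep _
  have h0 := pv_foldA_eq_aGo keep (List.replicate keep.toNat (-1)) pairs pairs []
    (List.replicate keep.toNat (-1)) PySem.Dict.empty (by simp)
  simp only [List.length_nil, Nat.cast_zero] at h0
  unfold Spec_get_latest_interaction
  simp only [get_latest_interaction, get_latest_interaction_alt, pv_init_eq]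
  rw [h0, pv_aGo_eq_bGo keep _ pairs.length pairs _ (Nat.le_refl _)]
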